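-- pv_equiv track=rewrite | github.com/nc1729/ternary_computer | triangulate/handle_instr.py | signed_value_to_tryte
-- ===== SOURCE A (Python) =====
-- septavingt_chars = "MLKJIHGFEDCBA0abcdefghijklm"
--
-- def signed_value_to_tryte(arg):
--     output_string = ""
--     dividend = int(arg)
--     remainder = 0
--     for i in range(3):
--         remainder = dividend % 27
--         dividend = dividend // 27
--         if (remainder > 13):
--             remainder -= 27
--             dividend += 1
--         elif (remainder < -13):
--             remainder += 27
--             dividend -= 1
--         output_string += septavingt_chars[13 + remainder]
--     return output_string[::-1]
-- ===== SOURCE B (Python) =====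
-- septavingt_chars = "MLKJIHGFEDCBA0abcdefghijklm"
--
-- def signed_value_to_tryte(arg):
--     # Shift by 9841 = 13*(27^2+27+1) so every balanced digit becomes an
--     # ordinary base-27 digit, then do three plain radix-27 extractions.
--     m = (int(arg) + 9841) % 19683
--     output_string = ""
--     for _ in range(3):
--         output_string = septavingt_chars[m % 27] + output_string
--         m //= 27
--     return output_string
-- ===== Notes on version B (the rewrite author's own statement) =====
-- stated objective: simpler
-- what changed: Replaces the balanced-digit loop with its carry-adjustment branches and final string reversal by a single offset (arg+9841) mod 19683 followed by three plain unsigned base-27 digit extractions, building the string most-significant-first.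
import Mathlib
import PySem

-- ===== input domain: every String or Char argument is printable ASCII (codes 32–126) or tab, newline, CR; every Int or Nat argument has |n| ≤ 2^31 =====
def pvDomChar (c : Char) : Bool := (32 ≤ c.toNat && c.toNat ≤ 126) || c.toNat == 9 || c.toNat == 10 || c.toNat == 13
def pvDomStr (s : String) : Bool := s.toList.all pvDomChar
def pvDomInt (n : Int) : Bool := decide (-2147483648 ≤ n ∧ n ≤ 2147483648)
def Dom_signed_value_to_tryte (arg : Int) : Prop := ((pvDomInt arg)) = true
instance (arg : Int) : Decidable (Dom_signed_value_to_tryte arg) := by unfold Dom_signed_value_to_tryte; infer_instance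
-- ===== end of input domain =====

-- B replaces A's balanced-digit carry branches and final reversal by one offset
-- (arg+9841) mod 19683 plus three plain base-27 digit extractions (objective: simpler).

-- shared constant: the Python module-level string septavingt_chars
def sv27 : String := "MLKJIHGFEDCBA0abcdefghijklm"
-- septavingt_chars[i] — the index is always in range for both programs (proved below)
def svChr (i : Int) : Char := (PySem.Str.pyGet? sv27 i).getD ' '

-- ===== PORT A =====
def svStepA (st : String × Int) : String × Int :=
  let r := PySem.Int.mod st.2 27
  let d := PySem.Int.floordiv st.2 27
  if 13 < r then (st.1.push (svChr (13 + (r - 27))), d + 1)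
  else if r < -13 then (st.1.push (svChr (13 + (r + 27))), d - 1)
  else (st.1.push (svChr (13 + r)), d)

def signed_value_to_tryte (arg : Int) : String :=
  let st := (PySem.List.pyRange 0 3 1).foldl (fun st _ => svStepA st) ("", arg)
  (PySem.Str.slice? st.1 none none (-1)).getD ""   -- output_string[::-1]

-- ===== PORT B =====
def signed_value_to_tryte_alt (arg : Int) : String :=
  let st := (PySem.List.pyRange 0 3 1).foldl
    (fun (st : String × Int) _ =>
      ((svChr (PySem.Int.mod st.2 27)).toString ++ st.1, PySem.Int.floordiv st.2 27))
    ("", PySem.Int.mod (arg + 9841) 19683)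
  st.1

-- ===== PRECONDITION & SPEC =====
def Spec_signed_value_to_tryte (arg : Int) (out : String) : Prop := out = signed_value_to_tryte_alt arg
instance (arg : Int) (out : String) : Decidable (Spec_signed_value_to_tryte arg out) := by unfold Spec_signed_value_to_tryte; infer_instance

-- ===== CLAIM (what is proved, stated in full; the proofs are below) =====
def Claim_equal_signed_value_to_tryte : Prop := ∀ (arg : Int), Dom_signed_value_to_tryte arg → Spec_signed_value_to_tryte arg (signed_value_to_tryte arg)

-- ===== LEMMAS AND PROOFS =====

-- A's balanced step equals a shifted plain floor-division step
theorem svStepA_eq (s : String) (d : Int) :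
    svStepA (s, d) = (s.push (svChr ((d + 13) % 27)), (d + 13) / 27) := by
  have hm : PySem.Int.mod d 27 = d % 27 := PySem.Int.mod_eq_emod_of_pos (by omega)
  have hd : PySem.Int.floordiv d 27 = d / 27 := PySem.Int.floordiv_eq_ediv_of_pos (by omega)
  simp only [svStepA, hm, hd]
  split_ifs with h1 h2
  · have hi : 13 + (d % 27 - 27) = (d + 13) % 27 := by omega
    have hq : d / 27 + 1 = (d + 13) / 27 := by omega
    rw [hi, hq]
  · have : 0 ≤ d % 27 := Int.emod_nonneg d (by omega)
    omega
  · have hi : 13 + d % 27 = (d + 13) % 27 := by omega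
    have hq : d / 27 = (d + 13) / 27 := by omega
    rw [hi, hq]

-- ===== VERDICT (by name: the statement is the Claim_ definition above) =====
theorem signed_value_to_tryte_spec : Claim_equal_signed_value_to_tryte := by
  intro arg _
  unfold Spec_signed_value_to_tryte
  unfold signed_value_to_tryte signed_value_to_tryte_alt
  have hr : PySem.List.pyRange 0 3 1 = [0, 1, 2] := by decide
  have hm : PySem.Int.mod (arg + 9841) 19683 = (arg + 9841) % 19683 :=
    PySem.Int.mod_eq_emod_of_pos (by omega)
  have hm27 : ∀ x : Int, PySem.Int.mod x 27 = x % 27 :=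
    fun x => PySem.Int.mod_eq_emod_of_pos (by omega)
  have hd27 : ∀ x : Int, PySem.Int.floordiv x 27 = x / 27 :=
    fun x => PySem.Int.floordiv_eq_ediv_of_pos (by omega)
  simp only [hr, hm, hm27, hd27, List.foldl, svStepA_eq]
  rw [PySem.Str.slice?_none_none_neg_one]
  set m : Int := (arg + 9841) % 19683 with hmdef
  have e0 : (arg + 13) % 27 = m % 27 := by omega
  have e1 : ((arg + 13) / 27 + 13) % 27 = m / 27 % 27 := by omega
  have e2 : (((arg + 13) / 27 + 13) / 27 + 13) % 27 = m / 27 / 27 % 27 := by omega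
  simp only [e0, e1, e2]
  generalize svChr (m % 27) = c0
  generalize svChr (m / 27 % 27) = c1
  generalize svChr (m / 27 / 27 % 27) = c2
  rw [← String.toList_inj]
  simp [String.toList_push]
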